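-- pv_equiv track=rewrite | github.com/cuthbertLab/music21 | music21/musicxml/fromMxObjects.py | _getUniqueStaffKeys
-- ===== SOURCE A (Python) =====
-- def _getUniqueStaffKeys(staffReferenceList):
--     '''
--     Given a list of staffReference dictionaries,
--     collect and return a list of all unique keys except None
--     '''
--     post = []
--     for staffReference in staffReferenceList:
--         for key in staffReference:
--             if key is not None and key not in post:
--                 post.append(key)
--     post.sort()
-- #    if len(post) > 0:
-- #        print post
--     return post
-- ===== SOURCE B (Python) =====
-- def _getUniqueStaffKeys(staffReferenceList):
--     # flatten all keys, sort once, then collapse adjacent duplicates in one pass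
--     keys = [key for staffReference in staffReferenceList
--             for key in staffReference if key is not None]
--     keys.sort()
--     out = []
--     for k in keys:
--         if not out or out[-1] != k:
--             out.append(k)
--     return out
-- ===== Notes on version B (the rewrite author's own statement) =====
-- stated objective: faster
-- what changed: A deduplicates with a linear 'key not in post' membership scan while collecting and sorts at the end; B flattens all keys into one list with duplicates, sorts that list once, and removes duplicates in a single adjacent-comparison sweep over the sorted list.
import Mathlib
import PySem

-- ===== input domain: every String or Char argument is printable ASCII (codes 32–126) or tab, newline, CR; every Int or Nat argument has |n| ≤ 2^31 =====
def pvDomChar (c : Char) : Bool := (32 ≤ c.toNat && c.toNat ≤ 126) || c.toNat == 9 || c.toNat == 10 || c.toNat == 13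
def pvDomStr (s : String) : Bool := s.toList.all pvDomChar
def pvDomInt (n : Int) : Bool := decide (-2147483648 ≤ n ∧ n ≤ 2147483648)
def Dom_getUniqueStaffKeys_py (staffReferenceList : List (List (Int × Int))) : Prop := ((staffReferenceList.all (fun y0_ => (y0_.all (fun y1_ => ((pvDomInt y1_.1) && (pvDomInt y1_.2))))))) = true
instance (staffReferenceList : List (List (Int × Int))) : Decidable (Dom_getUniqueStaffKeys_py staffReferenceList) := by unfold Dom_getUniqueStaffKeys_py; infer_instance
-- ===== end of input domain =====

-- B replaces A's collect-with-membership-scan-then-sort by flatten-all-keys, sort once,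
-- then a single adjacent-comparison sweep that drops consecutive duplicates ("alternative").

-- ===== PORT A =====
-- post = []; for staffReference in …: for key in staffReference: if key not in post: post.append(key)
-- (keys are Int, never None, so the 'key is not None' test is always true); then post.sort()
def getUniqueStaffKeys_py (staffReferenceList : List (List (Int × Int))) : List Int :=
  let post := staffReferenceList.foldl
    (fun post staffReference =>
      staffReference.foldl
        (fun post kv => if kv.1 ∈ post then post else post ++ [kv.1]) post)
    []
  PySem.List.sorted post (fun x => x) false

-- ===== PORT B =====
-- keys = all keys flattened (duplicates kept); keys.sort(); one pass appending k unless out[-1] == k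
def getUniqueStaffKeys_py_alt (staffReferenceList : List (List (Int × Int))) : List Int :=
  let keys := PySem.List.sorted
    (staffReferenceList.flatMap (fun staffReference => staffReference.map Prod.fst))
    (fun x => x) false
  keys.foldl (fun out k => if out.getLast? = some k then out else out ++ [k]) []

-- ===== PRECONDITION & SPEC =====
def Spec_getUniqueStaffKeys_py (staffReferenceList : List (List (Int × Int))) (out : List Int) : Prop := out = getUniqueStaffKeys_py_alt staffReferenceList
instance (staffReferenceList : List (List (Int × Int))) (out : List Int) : Decidable (Spec_getUniqueStaffKeys_py staffReferenceList out) := by unfold Spec_getUniqueStaffKeys_py; infer_instance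

-- ===== CLAIM (what is proved, stated in full; the proofs are below) =====
def Claim_equal_getUniqueStaffKeys_py : Prop := ∀ (staffReferenceList : List (List (Int × Int))), Dom_getUniqueStaffKeys_py staffReferenceList → Spec_getUniqueStaffKeys_py staffReferenceList (getUniqueStaffKeys_py staffReferenceList)

-- ===== LEMMAS AND PROOFS =====

-- A's inner fold over one dictionary's pairs: keeps Nodup, membership = old ∨ a key of the dict
theorem innerFold_spec (sr : List (Int × Int)) : ∀ (acc : List Int), acc.Nodup →
    (sr.foldl (fun post kv => if kv.1 ∈ post then post else post ++ [kv.1]) acc).Nodup ∧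
    (∀ x, x ∈ sr.foldl (fun post kv => if kv.1 ∈ post then post else post ++ [kv.1]) acc ↔
      x ∈ acc ∨ x ∈ sr.map Prod.fst) := by
  induction sr with
  | nil => intro acc h; simpa using h
  | cons kv rest ih =>
    intro acc h
    simp only [List.foldl_cons]
    by_cases hm : kv.1 ∈ acc
    · rw [if_pos hm]
      obtain ⟨h1, h2⟩ := ih acc h
      refine ⟨h1, fun x => ?_⟩
      rw [h2 x]
      constructor
      · rintro (hx | hx) <;> simp [hx]
      · rintro (hx | hx)
        · exact Or.inl hx
        · simp only [List.map_cons, List.mem_cons] at hx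
          rcases hx with hx | hx
          · exact Or.inl (hx ▸ hm)
          · exact Or.inr hx
    · rw [if_neg hm]
      have hnd : (acc ++ [kv.1]).Nodup := by
        refine List.Nodup.append h (List.nodup_singleton _) ?_
        intro a ha hb
        rw [List.mem_singleton] at hb
        exact hm (hb ▸ ha)
      obtain ⟨h1, h2⟩ := ih _ hnd
      refine ⟨h1, fun x => ?_⟩
      rw [h2 x]
      simp only [List.mem_append, List.map_cons, List.mem_cons]
      tauto

-- A's outer fold: result is Nodup and its members are exactly the keys of all dictionaries
theorem outerFold_spec (L : List (List (Int × Int))) : ∀ (acc : List Int), acc.Nodup →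
    (L.foldl (fun post sr => sr.foldl (fun p kv => if kv.1 ∈ p then p else p ++ [kv.1]) post) acc).Nodup ∧
    (∀ x, x ∈ L.foldl (fun post sr => sr.foldl (fun p kv => if kv.1 ∈ p then p else p ++ [kv.1]) post) acc ↔
      x ∈ acc ∨ x ∈ L.flatMap (fun sr => sr.map Prod.fst)) := by
  induction L with
  | nil => intro acc h; simpa using h
  | cons sr rest ih =>
    intro acc h
    simp only [List.foldl_cons]
    obtain ⟨h1, h2⟩ := innerFold_spec sr acc h
    obtain ⟨h3, h4⟩ := ih _ h1
    refine ⟨h3, fun x => ?_⟩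
    rw [h4 x, h2 x]
    simp only [List.flatMap_cons, List.mem_append]
    tauto

-- in a strictly increasing list whose elements are all ≤ k, membership of k means k is the last element
theorem mem_last_of_max (k : Int) : ∀ (acc : List Int), acc.Pairwise (· < ·) →
    (∀ a ∈ acc, a ≤ k) → k ∈ acc → acc.getLast? = some k
  | [] => by intro _ _ h; cases h
  | [a] => by
      intro _ _ hm
      simp only [List.mem_singleton] at hm
      simp [hm]
  | a :: b :: t => by
      intro hp hle hm
      rw [List.getLast?_cons_cons]
      have hab : a < b := (List.pairwise_cons.1 hp).1 b (by simp)
      have hk : k ∈ b :: t := by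
        rcases List.mem_cons.1 hm with rfl | hm'
        · exfalso
          have := hle b (by simp)
          omega
        · exact hm'
      exact mem_last_of_max k (b :: t) (List.pairwise_cons.1 hp).2
        (fun a ha => hle a (List.mem_cons_of_mem _ ha)) hk

-- B's adjacent-dedup sweep over a ≤-sorted list: result strictly increasing, members unchanged
theorem dedupFold_spec : ∀ (l acc : List Int), acc.Pairwise (· < ·) → l.Pairwise (· ≤ ·) →
    (∀ a ∈ acc, ∀ b ∈ l, a ≤ b) →
    (l.foldl (fun out k => if out.getLast? = some k then out else out ++ [k]) acc).Pairwise (· < ·) ∧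
    (∀ x, x ∈ l.foldl (fun out k => if out.getLast? = some k then out else out ++ [k]) acc ↔
      x ∈ acc ∨ x ∈ l) := by
  intro l
  induction l with
  | nil => intro acc h _ _; simpa using h
  | cons y rest ih =>
    intro acc hacc hl hbound
    simp only [List.foldl_cons]
    have hrest : rest.Pairwise (· ≤ ·) := (List.pairwise_cons.1 hl).2
    have hkrest : ∀ b ∈ rest, y ≤ b := (List.pairwise_cons.1 hl).1
    by_cases hlast : acc.getLast? = some y
    · rw [if_pos hlast]
      have hkacc : y ∈ acc := by
        have := List.getLast?_eq_some_iff.1 hlast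
        obtain ⟨t, rfl⟩ := this
        simp
      obtain ⟨h1, h2⟩ := ih acc hacc hrest
        (fun a ha b hb => le_trans (hbound a ha y (by simp)) (hkrest b hb))
      refine ⟨h1, fun x => ?_⟩
      rw [h2 x]
      simp only [List.mem_cons]
      constructor
      · tauto
      · rintro (hx | rfl | hx) <;> [exact Or.inl hx; exact Or.inl hkacc; exact Or.inr hx]
    · rw [if_neg hlast]
      have hknotin : y ∉ acc := fun hk =>
        hlast (mem_last_of_max y acc hacc (fun a ha => hbound a ha y (by simp)) hk)
      have hacc' : (acc ++ [y]).Pairwise (· < ·) := by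
        rw [List.pairwise_append]
        refine ⟨hacc, by simp, fun a ha b hb => ?_⟩
        have hb' : b = y := List.mem_singleton.1 hb
        have h1 : a ≤ y := hbound a ha y (by simp)
        have h2 : a ≠ y := fun h => hknotin (h ▸ ha)
        omega
      have hbound' : ∀ a ∈ acc ++ [y], ∀ b ∈ rest, a ≤ b := by
        intro a ha b hb
        rcases List.mem_append.1 ha with ha | ha
        · exact le_trans (hbound a ha y (by simp)) (hkrest b hb)
        · simp only [List.mem_singleton] at ha; subst ha; exact hkrest b hb
      obtain ⟨h1, h2⟩ := ih (acc ++ [y]) hacc' hrest hbound'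
      refine ⟨h1, fun x => ?_⟩
      rw [h2 x]
      simp only [List.mem_append, List.mem_cons]
      tauto

-- ===== VERDICT (by name: the statement is the Claim_ definition above) =====
theorem getUniqueStaffKeys_py_spec : Claim_equal_getUniqueStaffKeys_py := by
  unfold Claim_equal_getUniqueStaffKeys_py
  intro L _
  unfold Spec_getUniqueStaffKeys_py getUniqueStaffKeys_py getUniqueStaffKeys_py_alt
  simp only []
  set allKeys := L.flatMap (fun sr => sr.map Prod.fst) with hAK
  set post := L.foldl (fun post sr => sr.foldl (fun p kv => if kv.1 ∈ p then p else p ++ [kv.1]) post) [] with hpost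
  obtain ⟨hndA, hmemA⟩ := outerFold_spec L [] List.nodup_nil
  -- B's side
  have hsortedB : (PySem.List.sorted allKeys (fun x => x) false).Pairwise (· ≤ ·) := by
    simpa using PySem.List.sorted_pairwise (xs := allKeys) (key := fun x => x)
  obtain ⟨hpwB, hmemB⟩ := dedupFold_spec (PySem.List.sorted allKeys (fun x => x) false) []
    List.Pairwise.nil hsortedB (by simp)
  set bres := (PySem.List.sorted allKeys (fun x => x) false).foldl
    (fun out k => if out.getLast? = some k then out else out ++ [k]) [] with hbres
  have hndB : bres.Nodup := hpwB.imp (fun h => ne_of_lt h)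
  -- same members
  have hmem : ∀ x, x ∈ bres ↔ x ∈ post := by
    intro x
    rw [hmemB x, hmemA x]
    simp only [List.not_mem_nil, false_or]
    exact (PySem.List.mem_sorted allKeys (fun x => x) false x).trans (by rw [hAK])
  have hperm : bres.Perm post := (List.perm_ext_iff_of_nodup hndB hndA).2 hmem
  exact PySem.List.sorted_eq_of_perm_of_pairwise_lt post bres (fun x => x) hperm (by simpa using hpwB)
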